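-- pv_equiv track=rewrite | github.com/lukaszkry/Codewars | Code Wars/Kata 4/Path Finder 1 can you reach the exit.py | convert
-- ===== SOURCE A (Python) =====
-- def convert(a):
--     row = []
--     table = []
--     counter = 0
--     row_counter = 0
--     column_counter = 0
--     for x in a:
--         column_counter += 1
--         counter += 1
--         if counter == len(a):
--             row.append('END')
--             table.append(row)
--             row_counter += 1
--         elif x != '\n':
--             row.append(x)
--         elif x == '\n':
--             table.append(row)
--             row = []
--             row_counter += 1
--             column_counter = 0
--     return (table,row_counter,column_counter)
-- ===== SOURCE B (Python) =====
-- def convert(a):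
--     if not a:
--         return ([], 0, 0)
--     segments = a[:-1].split('\n')
--     table = [list(seg) for seg in segments]
--     table[-1].append('END')
--     return (table, len(segments), len(table[-1]))
-- ===== Notes on version B (the rewrite author's own statement) =====
-- stated objective: simpler
-- what changed: A's single character loop with five mutable state variables (row, table, counter, row_counter, column_counter) is replaced by a direct decomposition: handle the empty string, split a[:-1] on newlines into segments, turn each segment into a list of characters and append the END sentinel to the last row; the counts fall out as the number of segments and the length of the last row.
import Mathlib
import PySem

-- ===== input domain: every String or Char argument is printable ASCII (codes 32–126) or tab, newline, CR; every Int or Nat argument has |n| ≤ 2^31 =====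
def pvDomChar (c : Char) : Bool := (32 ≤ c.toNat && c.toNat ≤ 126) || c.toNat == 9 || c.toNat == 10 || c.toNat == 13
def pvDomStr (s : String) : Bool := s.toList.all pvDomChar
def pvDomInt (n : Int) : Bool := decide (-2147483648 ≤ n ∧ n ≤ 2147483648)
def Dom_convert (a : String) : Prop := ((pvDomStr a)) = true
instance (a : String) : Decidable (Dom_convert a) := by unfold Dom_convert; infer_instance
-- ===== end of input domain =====

-- B replaces A's single stateful character loop (five mutable loop variables) by a direct
-- decomposition: split a[:-1] on '\n' and append the END sentinel to the last row (objective: simpler).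

-- ===== PORT A =====
-- one step of A's for-loop; n = len(a), state = (row, table, counter, row_counter, column_counter)
def convertStep (n : Int) (st : List String × List (List String) × Int × Int × Int) (x : Char) :
    List String × List (List String) × Int × Int × Int :=
  let (row, table, counter, rc, cc) := st
  let cc := cc + 1
  let counter := counter + 1
  if counter = n then
    let row := row ++ ["END"]
    (row, table ++ [row], counter, rc + 1, cc)
  else if x ≠ '\n' then
    (row ++ [String.ofList [x]], table, counter, rc, cc)
  else
    ([], table ++ [row], counter, rc + 1, 0)

def convert (a : String) : List (List String) × Int × Int :=
  let cs := a.toList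
  let st := cs.foldl (convertStep (cs.length : Int)) ([], [], 0, 0, 0)
  (st.2.1, st.2.2.2.1, st.2.2.2.2)

-- ===== PORT B =====
-- list(seg): each character becomes a one-character string
def mkRow (seg : List Char) : List String := seg.map (fun c => String.ofList [c])

def convert_alt (a : String) : List (List String) × Int × Int :=
  if a.toList = [] then ([], 0, 0)
  else
    let segments := (PySem.List.slice a.toList none (some (-1))).splitOn '\n'
    let table := segments.map mkRow
    let last := table.getLastD [] ++ ["END"]
    (table.dropLast ++ [last], (segments.length : Int), (last.length : Int))

-- ===== PRECONDITION & SPEC =====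
def Spec_convert (a : String) (out : List (List String) × Int × Int) : Prop := out = convert_alt a
instance (a : String) (out : List (List String) × Int × Int) : Decidable (Spec_convert a out) := by unfold Spec_convert; infer_instance

-- ===== CLAIM (what is proved, stated in full; the proofs are below) =====
def Claim_equal_convert : Prop := ∀ (a : String), Dom_convert a → Spec_convert a (convert a)

-- ===== LEMMAS AND PROOFS =====

-- appending one character to the string being split either opens a fresh segment or extends the last one
theorem splitOn_concat (x : Char) (body : List Char) :
    (body ++ [x]).splitOn '\n' =
      if x = '\n' then body.splitOn '\n' ++ [[]]
      else (body.splitOn '\n').dropLast ++ [(body.splitOn '\n').getLastD [] ++ [x]] := by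
  induction body with
  | nil =>
    by_cases hx : x = '\n' <;> simp [List.splitOn, List.splitOnP_cons, List.splitOnP_nil, hx]
  | cons y ys ih =>
    have hne := List.splitOnP_ne_nil (p := fun c => c == '\n') ys
    obtain ⟨s0, S, hS⟩ := List.exists_cons_of_ne_nil hne
    by_cases hy : y = '\n' <;> by_cases hx : x = '\n' <;>
      cases S <;> simp_all [List.splitOn, List.splitOnP_cons]

theorem getLast?_cons_concat {α : Type} (a b : α) (l : List α) :
    (a :: (l ++ [b])).getLast? = some b := by
  rw [← List.cons_append, List.getLast?_concat]

theorem dropLast_cons_concat {α : Type} (a b : α) (l : List α) :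
    (a :: (l ++ [b])).dropLast = a :: l := by
  induction l generalizing a <;> simp_all

theorem mkRow_nil : mkRow [] = [] := rfl

theorem mkRow_length (x : List Char) : (mkRow x).length = x.length := by simp [mkRow]

theorem mkRow_dropLast_concat (a : List Char) (l : List (List Char)) :
    (mkRow a :: l.map mkRow).dropLast ++ [mkRow ((a :: l).getLast?.getD [])] =
      mkRow a :: l.map mkRow := by
  induction l generalizing a with
  | nil => simp
  | cons b t ih => simpa using ih b

theorem getLastD_map_mkRow (a : List Char) (l : List (List Char)) :
    (mkRow a :: l.map mkRow).getLast?.getD [] = mkRow ((a :: l).getLast?.getD []) := by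
  induction l generalizing a <;> simp_all

-- A's loop invariant over a strict prefix of the input (counter never reaches n)
theorem foldA (body : List Char) (n : Int) (h : (body.length : Int) < n) :
    body.foldl (convertStep n) ([], [], 0, 0, 0) =
      (mkRow ((body.splitOn '\n').getLastD []),
       ((body.splitOn '\n').dropLast).map mkRow,
       (body.length : Int),
       ((body.splitOn '\n').length : Int) - 1,
       (((body.splitOn '\n').getLastD []).length : Int)) := by
  induction body using List.reverseRecOn with
  | nil => simp [List.splitOn, List.splitOnP_nil, mkRow]
  | append_singleton ys x ih =>
    rw [List.foldl_append]
    rw [ih (by simp at h ⊢; omega)]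
    rw [splitOn_concat]
    have hne := List.splitOnP_ne_nil (p := fun c => c == '\n') ys
    have hcnt : ((ys.length : Int) + 1 ≠ n) := by simp at h; omega
    obtain ⟨s0, S, hS⟩ := List.exists_cons_of_ne_nil hne
    have hS' : ys.splitOn '\n' = s0 :: S := hS
    rw [hS']
    by_cases hx : x = '\n'
    · simp [convertStep, hcnt, hx, getLast?_cons_concat, dropLast_cons_concat,
        mkRow_dropLast_concat, mkRow_nil]
    · simp [convertStep, hcnt, hx, mkRow]

-- ===== VERDICT (by name: the statement is the Claim_ definition above) =====
theorem convert_spec : Claim_equal_convert := by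
  intro a _
  show convert a = convert_alt a
  unfold convert convert_alt
  by_cases hnil : a.toList = []
  · simp [hnil]
  · simp only [if_neg hnil]
    rw [PySem.List.slice_to_neg_one]
    rw [← List.dropLast_append_getLast hnil]
    rw [List.foldl_append]
    rw [foldA _ _ (by simp)]
    rw [List.dropLast_concat]
    have hne := List.splitOnP_ne_nil (p := fun c => c == '\n') a.toList.dropLast
    obtain ⟨s0, S, hS⟩ := List.exists_cons_of_ne_nil hne
    have hS' : a.toList.dropLast.splitOn '\n' = s0 :: S := hS
    rw [hS']
    simp [convertStep, getLastD_map_mkRow, List.map_dropLast, mkRow_length]
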